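-- pv_equiv track=rewrite | github.com/NeuralBlitz/Linkglys | reports/autonomous_self_evolution_upgrades_report.py | _are_related
-- ===== SOURCE A (Python) =====
-- def _are_related(target1: str, target2: str) -> bool:
--     """Check if two capability targets are related"""
--     capability_groups = {
--         "cognitive": ["learning", "reasoning", "creativity"],
--         "social": ["compassion", "empathy", "communication"],
--         "meta": ["wisdom", "self_awareness", "reflection"],
--     }
--
--     for group in capability_groups.values():
--         if target1 in group and target2 in group:
--             return True
--     return False
-- ===== SOURCE B (Python) =====
-- def _are_related(target1: str, target2: str) -> bool:
--     """Check if two capability targets are related"""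
--     capability_groups = {
--         "cognitive": ["learning", "reasoning", "creativity"],
--         "social": ["compassion", "empathy", "communication"],
--         "meta": ["wisdom", "self_awareness", "reflection"],
--     }
--     index = {t: g for g, members in capability_groups.items() for t in members}
--     g1 = index.get(target1)
--     return g1 is not None and g1 == index.get(target2)
-- ===== Notes on version B (the rewrite author's own statement) =====
-- stated objective: idiomatic
-- what changed: Replaces the loop over groups with double membership tests by a precomputed reverse index (target -> group name) built once by a dict comprehension, then a single guarded lookup comparison.
import Mathlib
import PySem

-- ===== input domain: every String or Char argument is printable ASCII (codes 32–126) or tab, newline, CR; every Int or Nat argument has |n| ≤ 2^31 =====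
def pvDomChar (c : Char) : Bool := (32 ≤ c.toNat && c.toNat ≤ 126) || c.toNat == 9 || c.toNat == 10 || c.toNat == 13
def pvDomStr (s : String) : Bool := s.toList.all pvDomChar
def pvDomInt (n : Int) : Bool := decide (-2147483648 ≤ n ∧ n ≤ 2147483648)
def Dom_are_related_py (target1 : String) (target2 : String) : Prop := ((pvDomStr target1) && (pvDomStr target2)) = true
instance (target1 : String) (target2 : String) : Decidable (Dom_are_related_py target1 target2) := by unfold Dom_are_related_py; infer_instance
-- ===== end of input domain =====

-- B replaces A's loop over the groups (two membership tests per group) by a reverse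
-- index from target to group name built once, then one guarded lookup comparison (idiomatic).

-- ===== PORT A =====
-- capability_groups.values()
def pvGroupsA : List (List String) :=
  [["learning", "reasoning", "creativity"],
   ["compassion", "empathy", "communication"],
   ["wisdom", "self_awareness", "reflection"]]

-- the 'for group in …: if target1 in group and target2 in group: return True' loop
def pvLoopA (target1 target2 : String) : List (List String) → Bool
  | [] => false
  | g :: rest => if g.contains target1 && g.contains target2 then true else pvLoopA target1 target2 rest

def are_related_py (target1 : String) (target2 : String) : Bool :=
  pvLoopA target1 target2 pvGroupsA

-- ===== PORT B =====
-- capability_groups.items()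
def pvGroupsB : List (String × List String) :=
  [("cognitive", ["learning", "reasoning", "creativity"]),
   ("social", ["compassion", "empathy", "communication"]),
   ("meta", ["wisdom", "self_awareness", "reflection"])]

-- index = {t: g for g, members in capability_groups.items() for t in members}
def pvIndexB : PySem.Dict String String :=
  pvGroupsB.foldl (fun d p => p.2.foldl (fun d t => d.insert t p.1) d) PySem.Dict.empty

def are_related_py_alt (target1 : String) (target2 : String) : Bool :=
  let g1 := pvIndexB.get? target1
  g1.isSome && g1 == pvIndexB.get? target2

-- ===== PRECONDITION & SPEC =====
def Spec_are_related_py (target1 : String) (target2 : String) (out : Bool) : Prop := out = are_related_py_alt target1 target2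
instance (target1 : String) (target2 : String) (out : Bool) : Decidable (Spec_are_related_py target1 target2 out) := by unfold Spec_are_related_py; infer_instance

-- ===== CLAIM (what is proved, stated in full; the proofs are below) =====
def Claim_equal_are_related_py : Prop := ∀ (target1 : String) (target2 : String), Dom_are_related_py target1 target2 → Spec_are_related_py target1 target2 (are_related_py target1 target2)

-- ===== LEMMAS AND PROOFS =====

-- the reverse-index lookup, unfolded to a chain of string comparisons
-- (keys in reverse insertion order; all keys are distinct, so the order is immaterial)
lemma pvGet (t : String) : pvIndexB.get? t =
    if t = "reflection" then some "meta" else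
    if t = "self_awareness" then some "meta" else
    if t = "wisdom" then some "meta" else
    if t = "communication" then some "social" else
    if t = "empathy" then some "social" else
    if t = "compassion" then some "social" else
    if t = "creativity" then some "cognitive" else
    if t = "reasoning" then some "cognitive" else
    if t = "learning" then some "cognitive" else none := by
  simp only [pvIndexB, pvGroupsB, List.foldl]
  simp [PySem.Dict.get?_insert, PySem.Dict.get?_empty]

-- exhaustive case split on which (if any) of the nine targets each argument equals
lemma pvMain (t1 t2 : String) : are_related_py t1 t2 = are_related_py_alt t1 t2 := by
  unfold are_related_py are_related_py_alt
  rw [pvGet t1, pvGet t2]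
  simp only [pvLoopA, pvGroupsA]
  rcases eq_or_ne t1 "reflection" with rfl | h1
  · rcases eq_or_ne t2 "reflection" with rfl | g1
    · decide
    rcases eq_or_ne t2 "self_awareness" with rfl | g2
    · decide
    rcases eq_or_ne t2 "wisdom" with rfl | g3
    · decide
    rcases eq_or_ne t2 "communication" with rfl | g4
    · decide
    rcases eq_or_ne t2 "empathy" with rfl | g5
    · decide
    rcases eq_or_ne t2 "compassion" with rfl | g6
    · decide
    rcases eq_or_ne t2 "creativity" with rfl | g7
    · decide
    rcases eq_or_ne t2 "reasoning" with rfl | g8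
    · decide
    rcases eq_or_ne t2 "learning" with rfl | g9
    · decide
    simp [g1, g2, g3, g4, g5, g6, g7, g8, g9]
  rcases eq_or_ne t1 "self_awareness" with rfl | h2
  · rcases eq_or_ne t2 "reflection" with rfl | g1
    · decide
    rcases eq_or_ne t2 "self_awareness" with rfl | g2
    · decide
    rcases eq_or_ne t2 "wisdom" with rfl | g3
    · decide
    rcases eq_or_ne t2 "communication" with rfl | g4
    · decide
    rcases eq_or_ne t2 "empathy" with rfl | g5
    · decide
    rcases eq_or_ne t2 "compassion" with rfl | g6
    · decide
    rcases eq_or_ne t2 "creativity" with rfl | g7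
    · decide
    rcases eq_or_ne t2 "reasoning" with rfl | g8
    · decide
    rcases eq_or_ne t2 "learning" with rfl | g9
    · decide
    simp [g1, g2, g3, g4, g5, g6, g7, g8, g9]
  rcases eq_or_ne t1 "wisdom" with rfl | h3
  · rcases eq_or_ne t2 "reflection" with rfl | g1
    · decide
    rcases eq_or_ne t2 "self_awareness" with rfl | g2
    · decide
    rcases eq_or_ne t2 "wisdom" with rfl | g3
    · decide
    rcases eq_or_ne t2 "communication" with rfl | g4
    · decide
    rcases eq_or_ne t2 "empathy" with rfl | g5
    · decide
    rcases eq_or_ne t2 "compassion" with rfl | g6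
    · decide
    rcases eq_or_ne t2 "creativity" with rfl | g7
    · decide
    rcases eq_or_ne t2 "reasoning" with rfl | g8
    · decide
    rcases eq_or_ne t2 "learning" with rfl | g9
    · decide
    simp [g1, g2, g3, g4, g5, g6, g7, g8, g9]
  rcases eq_or_ne t1 "communication" with rfl | h4
  · rcases eq_or_ne t2 "reflection" with rfl | g1
    · decide
    rcases eq_or_ne t2 "self_awareness" with rfl | g2
    · decide
    rcases eq_or_ne t2 "wisdom" with rfl | g3
    · decide
    rcases eq_or_ne t2 "communication" with rfl | g4
    · decide
    rcases eq_or_ne t2 "empathy" with rfl | g5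
    · decide
    rcases eq_or_ne t2 "compassion" with rfl | g6
    · decide
    rcases eq_or_ne t2 "creativity" with rfl | g7
    · decide
    rcases eq_or_ne t2 "reasoning" with rfl | g8
    · decide
    rcases eq_or_ne t2 "learning" with rfl | g9
    · decide
    simp [g1, g2, g3, g4, g5, g6, g7, g8, g9]
  rcases eq_or_ne t1 "empathy" with rfl | h5
  · rcases eq_or_ne t2 "reflection" with rfl | g1
    · decide
    rcases eq_or_ne t2 "self_awareness" with rfl | g2
    · decide
    rcases eq_or_ne t2 "wisdom" with rfl | g3
    · decide
    rcases eq_or_ne t2 "communication" with rfl | g4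
    · decide
    rcases eq_or_ne t2 "empathy" with rfl | g5
    · decide
    rcases eq_or_ne t2 "compassion" with rfl | g6
    · decide
    rcases eq_or_ne t2 "creativity" with rfl | g7
    · decide
    rcases eq_or_ne t2 "reasoning" with rfl | g8
    · decide
    rcases eq_or_ne t2 "learning" with rfl | g9
    · decide
    simp [g1, g2, g3, g4, g5, g6, g7, g8, g9]
  rcases eq_or_ne t1 "compassion" with rfl | h6
  · rcases eq_or_ne t2 "reflection" with rfl | g1
    · decide
    rcases eq_or_ne t2 "self_awareness" with rfl | g2
    · decide
    rcases eq_or_ne t2 "wisdom" with rfl | g3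
    · decide
    rcases eq_or_ne t2 "communication" with rfl | g4
    · decide
    rcases eq_or_ne t2 "empathy" with rfl | g5
    · decide
    rcases eq_or_ne t2 "compassion" with rfl | g6
    · decide
    rcases eq_or_ne t2 "creativity" with rfl | g7
    · decide
    rcases eq_or_ne t2 "reasoning" with rfl | g8
    · decide
    rcases eq_or_ne t2 "learning" with rfl | g9
    · decide
    simp [g1, g2, g3, g4, g5, g6, g7, g8, g9]
  rcases eq_or_ne t1 "creativity" with rfl | h7
  · rcases eq_or_ne t2 "reflection" with rfl | g1
    · decide
    rcases eq_or_ne t2 "self_awareness" with rfl | g2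
    · decide
    rcases eq_or_ne t2 "wisdom" with rfl | g3
    · decide
    rcases eq_or_ne t2 "communication" with rfl | g4
    · decide
    rcases eq_or_ne t2 "empathy" with rfl | g5
    · decide
    rcases eq_or_ne t2 "compassion" with rfl | g6
    · decide
    rcases eq_or_ne t2 "creativity" with rfl | g7
    · decide
    rcases eq_or_ne t2 "reasoning" with rfl | g8
    · decide
    rcases eq_or_ne t2 "learning" with rfl | g9
    · decide
    simp [g1, g2, g3, g4, g5, g6, g7, g8, g9]
  rcases eq_or_ne t1 "reasoning" with rfl | h8
  · rcases eq_or_ne t2 "reflection" with rfl | g1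
    · decide
    rcases eq_or_ne t2 "self_awareness" with rfl | g2
    · decide
    rcases eq_or_ne t2 "wisdom" with rfl | g3
    · decide
    rcases eq_or_ne t2 "communication" with rfl | g4
    · decide
    rcases eq_or_ne t2 "empathy" with rfl | g5
    · decide
    rcases eq_or_ne t2 "compassion" with rfl | g6
    · decide
    rcases eq_or_ne t2 "creativity" with rfl | g7
    · decide
    rcases eq_or_ne t2 "reasoning" with rfl | g8
    · decide
    rcases eq_or_ne t2 "learning" with rfl | g9
    · decide
    simp [g1, g2, g3, g4, g5, g6, g7, g8, g9]
  rcases eq_or_ne t1 "learning" with rfl | h9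
  · rcases eq_or_ne t2 "reflection" with rfl | g1
    · decide
    rcases eq_or_ne t2 "self_awareness" with rfl | g2
    · decide
    rcases eq_or_ne t2 "wisdom" with rfl | g3
    · decide
    rcases eq_or_ne t2 "communication" with rfl | g4
    · decide
    rcases eq_or_ne t2 "empathy" with rfl | g5
    · decide
    rcases eq_or_ne t2 "compassion" with rfl | g6
    · decide
    rcases eq_or_ne t2 "creativity" with rfl | g7
    · decide
    rcases eq_or_ne t2 "reasoning" with rfl | g8
    · decide
    rcases eq_or_ne t2 "learning" with rfl | g9
    · decide
    simp [g1, g2, g3, g4, g5, g6, g7, g8, g9]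
  rcases eq_or_ne t2 "reflection" with rfl | g1
  · simp_all
  rcases eq_or_ne t2 "self_awareness" with rfl | g2
  · simp_all
  rcases eq_or_ne t2 "wisdom" with rfl | g3
  · simp_all
  rcases eq_or_ne t2 "communication" with rfl | g4
  · simp_all
  rcases eq_or_ne t2 "empathy" with rfl | g5
  · simp_all
  rcases eq_or_ne t2 "compassion" with rfl | g6
  · simp_all
  rcases eq_or_ne t2 "creativity" with rfl | g7
  · simp_all
  rcases eq_or_ne t2 "reasoning" with rfl | g8
  · simp_all
  rcases eq_or_ne t2 "learning" with rfl | g9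
  · simp_all
  simp_all

-- ===== VERDICT (by name: the statement is the Claim_ definition above) =====
theorem are_related_py_spec : Claim_equal_are_related_py := by
  intro t1 t2 _
  unfold Spec_are_related_py
  exact pvMain t1 t2
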